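-- pv_equiv track=rewrite | github.com/HosseinOutward/FoundationsOfAlgorithms_SBU_Course | Minds/High Minded Tree.py | f
-- ===== SOURCE A (Python) =====
-- def f(w, n):
--     try:
--         c=2*n+1
--         if w[n]<w[c]:
--             return f(w, c)
--         if w[n]<w[c+1]:
--             return f(w, c+1)
--     except:
--         pass
--     return w[n], n+1
-- ===== SOURCE B (Python) =====
-- def f(w, n):
--     while 2 * n + 1 < len(w):
--         c = 2 * n + 1
--         if w[n] < w[c]:
--             n = c
--         elif c + 1 < len(w) and w[n] < w[c + 1]:
--             n = c + 1
--         else: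
--             break
--     return w[n], n + 1
-- ===== Notes on version B (the rewrite author's own statement) =====
-- stated objective: alternative
-- what changed: The tail recursion with a bare try/except is replaced by an iterative sift-down loop over the current index with explicit bounds checks on the child indices; Pre_ excludes out-of-range start indices (where A raises IndexError) and negative start indices, on which A's descent through Python's negative-index wraparound silenced by the bare except is an accident of the implementation and B's natural loop can raise.
-- outside the precondition, e.g. on f([1, 9], -2): A returns (1, -1), B raises IndexError
import Mathlib
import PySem

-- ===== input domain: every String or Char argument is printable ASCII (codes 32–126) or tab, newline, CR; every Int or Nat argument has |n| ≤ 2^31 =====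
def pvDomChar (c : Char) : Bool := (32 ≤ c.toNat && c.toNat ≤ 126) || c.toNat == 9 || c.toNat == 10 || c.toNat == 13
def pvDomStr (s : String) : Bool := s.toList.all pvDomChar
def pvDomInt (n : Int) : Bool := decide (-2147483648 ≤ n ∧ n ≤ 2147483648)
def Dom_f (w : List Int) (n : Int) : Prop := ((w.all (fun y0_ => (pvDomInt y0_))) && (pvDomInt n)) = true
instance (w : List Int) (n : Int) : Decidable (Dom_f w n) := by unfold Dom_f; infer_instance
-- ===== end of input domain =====

-- B replaces A's tail recursion + bare try/except by an iterative sift-down loop with explicit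
-- bounds checks on the child indices.

-- ===== PORT A =====
-- A's recursion, with a fuel guard for totality only (fuel 2*len+2 provably exceeds the descent
-- depth on every input Pre_f admits, so the fuel-0 branch is never reached there).
-- `w[n] < w[c]` evaluates w[n] first, then w[c]; an IndexError inside the try is swallowed and
-- `return w[n], n+1` runs.  When w[n] itself is out of range Python re-raises at the final
-- `return` — excluded by Pre_f; the port returns junk (0, n+1) there.
def fAux : Nat → List Int → Int → Int × Int
  | 0, _, n => (0, n + 1)
  | fuel + 1, w, n =>
    match PySem.List.pyGet? w n, PySem.List.pyGet? w (2 * n + 1) with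
    | some wn, some wc =>
        if wn < wc then fAux fuel w (2 * n + 1)
        else
          match PySem.List.pyGet? w (2 * n + 2) with
          | some wc1 => if wn < wc1 then fAux fuel w (2 * n + 2) else (wn, n + 1)
          | none => (wn, n + 1)
    | some wn, none => (wn, n + 1)
    | none, _ => (0, n + 1)

def f (w : List Int) (n : Int) : Int × Int := fAux (2 * w.length + 2) w n

-- ===== PORT B =====
-- loop body of Source B: the state is the current index n; same fuel guard for totality
def fAltLoop : Nat → List Int → Int → Int × Int
  | 0, w, n => (PySem.List.pyGetD w n 0, n + 1)
  | fuel + 1, w, n =>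
    if 2 * n + 1 < (w.length : Int) then
      if PySem.List.pyGetD w n 0 < PySem.List.pyGetD w (2 * n + 1) 0 then
        fAltLoop fuel w (2 * n + 1)
      else if 2 * n + 2 < (w.length : Int) ∧
          PySem.List.pyGetD w n 0 < PySem.List.pyGetD w (2 * n + 2) 0 then
        fAltLoop fuel w (2 * n + 2)
      else (PySem.List.pyGetD w n 0, n + 1)
    else (PySem.List.pyGetD w n 0, n + 1)

def f_alt (w : List Int) (n : Int) : Int × Int := fAltLoop (2 * w.length + 2) w n

-- ===== PRECONDITION & SPEC =====
-- Pre_f excludes out-of-range start indices, where A raises IndexError, and negative start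
-- indices, on which A's descent through Python's negative-index wraparound silenced by the bare
-- except is an accident of the implementation (B's natural loop raises IndexError on some of them).
def Pre_f (w : List Int) (n : Int) : Prop := 0 ≤ n ∧ n < (w.length : Int)
instance (w : List Int) (n : Int) : Decidable (Pre_f w n) := by unfold Pre_f; infer_instance
def pvWitness_f : List Int × Int := ([3, 7, 2, 1, 9], 0)

def Spec_f (w : List Int) (n : Int) (out : Int × Int) : Prop := out = f_alt w n
instance (w : List Int) (n : Int) (out : Int × Int) : Decidable (Spec_f w n out) := by unfold Spec_f; infer_instance

-- ===== CLAIM (what is proved, stated in full; the proofs are below) =====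
def Claim_equal_f : Prop := ∀ (w : List Int) (n : Int), Dom_f w n → Pre_f w n → Spec_f w n (f w n)

-- ===== LEMMAS AND PROOFS =====

-- a successful index access is in range
theorem pvInRange {xs : List Int} {i : Int} {x : Int} (h : PySem.List.pyGet? xs i = some x) :
    -(xs.length : Int) ≤ i ∧ i < (xs.length : Int) := by
  by_contra hcon
  have : PySem.List.pyGet? xs i = none := by
    rw [PySem.List.pyGet?_eq_none_iff]
    exact fun hr => hcon ⟨hr.1, hr.2⟩
  simp [this] at h

theorem pvGetD_of_some {xs : List Int} {i x : Int} (d : Int)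
    (h : PySem.List.pyGet? xs i = some x) : PySem.List.pyGetD xs i d = x := by
  simp [PySem.List.pyGetD, h]

theorem pvGetSome {xs : List Int} {i : Int} (h0 : 0 ≤ i) (h1 : i < (xs.length : Int)) :
    ∃ x, PySem.List.pyGet? xs i = some x := by
  cases h : PySem.List.pyGet? xs i with
  | none =>
    have := (PySem.List.pyGet?_eq_none_iff xs i).mp h
    exact absurd ⟨by omega, h1⟩ this
  | some x => exact ⟨x, rfl⟩

-- main invariant: with enough fuel on both sides, A's recursion and B's loop agree on 0 ≤ n < len
theorem pvMain (w : List Int) : ∀ (fa fb : Nat) (n : Int),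
    ((w.length : Int) - 1 - n).toNat < fa → ((w.length : Int) - 1 - n).toNat < fb →
    0 ≤ n → n < (w.length : Int) →
    fAux fa w n = fAltLoop fb w n := by
  intro fa
  induction fa with
  | zero => intro fb n hfa; exact absurd hfa (Nat.not_lt_zero _)
  | succ fa ih =>
    intro fb n hfa hfb ha hb
    match fb with
    | 0 => exact absurd hfb (Nat.not_lt_zero _)
    | fb + 1 =>
      obtain ⟨wn, h1⟩ := pvGetSome ha hb
      cases h2 : PySem.List.pyGet? w (2 * n + 1) with
      | none =>
        have hnr := (PySem.List.pyGet?_eq_none_iff w (2 * n + 1)).mp h2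
        have hge : ¬ (2 * n + 1 < (w.length : Int)) := fun hcon => hnr ⟨by omega, hcon⟩
        simp only [fAux, fAltLoop, h1, h2]
        rw [if_neg hge, pvGetD_of_some 0 h1]
      | some wc =>
        have hc := pvInRange h2
        by_cases hlt : wn < wc
        · simp only [fAux, fAltLoop, h1, h2]
          rw [if_pos hc.2, pvGetD_of_some 0 h1, pvGetD_of_some 0 h2, if_pos hlt, if_pos hlt]
          exact ih fb (2 * n + 1) (by omega) (by omega) (by omega) hc.2
        · cases h3 : PySem.List.pyGet? w (2 * n + 2) with
          | none =>
            have hnr := (PySem.List.pyGet?_eq_none_iff w (2 * n + 2)).mp h3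
            have hge : ¬ (2 * n + 2 < (w.length : Int)) := fun hcon => hnr ⟨by omega, hcon⟩
            simp only [fAux, fAltLoop, h1, h2, h3]
            rw [if_neg hlt, if_pos hc.2, pvGetD_of_some 0 h1, pvGetD_of_some 0 h2, if_neg hlt,
              if_neg (fun hcon => hge hcon.1)]
          | some wc1 =>
            have hd := pvInRange h3
            by_cases hlt2 : wn < wc1
            · simp only [fAux, fAltLoop, h1, h2, h3]
              rw [if_neg hlt, if_pos hlt2, if_pos hc.2, pvGetD_of_some 0 h1, pvGetD_of_some 0 h2,
                if_neg hlt, pvGetD_of_some 0 h3, if_pos ⟨hd.2, hlt2⟩]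
              have hd2 : 2 * n + 2 < (w.length : Int) := hd.2
              exact ih fb (2 * n + 2) (by omega) (by omega) (by omega) hd2
            · simp only [fAux, fAltLoop, h1, h2, h3]
              rw [if_neg hlt, if_neg hlt2, if_pos hc.2, pvGetD_of_some 0 h1, pvGetD_of_some 0 h2,
                if_neg hlt, pvGetD_of_some 0 h3, if_neg (fun hcon => hlt2 hcon.2)]

-- ===== VERDICT (by name: the statement is the Claim_ definition above) =====
theorem f_spec : Claim_equal_f := by
  intro w n _ hpre
  obtain ⟨h0, h1⟩ := hpre
  unfold Spec_f f_alt f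
  exact pvMain w (2 * w.length + 2) (2 * w.length + 2) n (by omega) (by omega) h0 h1
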